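-- pv_equiv track=rewrite | github.com/OncoHarmony-Network/circrna-pipeline | common/common.py | find_common_entries
-- ===== SOURCE A (Python) =====
-- from collections import defaultdict
--
-- def find_common_entries(bed_entries, deviation=3, count_threshold=2):
--     bed_entries_dict = defaultdict(int)
--     common_entries = []
--
--     for entry in bed_entries:
--
--         if len(bed_entries_dict) == 0:
--             bed_entries_dict[entry] += 1
--         else:
--             flag = []
--             for other_entry, count in bed_entries_dict.items():
--                 if entry[0] == other_entry[0] and \
--                     abs(entry[1] - other_entry[1]) <= deviation and abs(entry[2] - other_entry[2]) <= deviation: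
--                     bed_entries_dict[other_entry] += 1
--                     flag.append(True)
--                 else:
--                     flag.append(False)
--             if not any(flag):
--                 bed_entries_dict[entry] += 1
--
--     for entry, count in bed_entries_dict.items():
--         if bed_entries_dict[entry] >= count_threshold:
--             common_entries.append(entry)
--
--     return common_entries
-- ===== SOURCE B (Python) =====
-- def find_common_entries(bed_entries, deviation=3, count_threshold=2):
--     counts = {}
--     by_chrom = {}  # chromosome -> representative keys on that chromosome, in insertion order
--     for entry in bed_entries:
--         matched = False
--         for key in by_chrom.get(entry[0], []):
--             if abs(entry[1] - key[1]) <= deviation and abs(entry[2] - key[2]) <= deviation: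
--                 counts[key] += 1
--                 matched = True
--         if not matched:
--             if entry in counts:
--                 counts[entry] += 1
--             else:
--                 counts[entry] = 1
--                 by_chrom.setdefault(entry[0], []).append(entry)
--     return [entry for entry in counts if counts[entry] >= count_threshold]
-- ===== Notes on version B (the rewrite author's own statement) =====
-- stated objective: alternative
-- what changed: B replaces A's per-entry scan over ALL accumulated representative keys (plus a flag list and a redundant empty-dict special case) by a per-chromosome hash index, so each entry is compared only against same-chromosome representatives and matched/unmatched is a single boolean.
-- outside the precondition, e.g. on find_common_entries([()], 3, 1): A returns [()], B raises IndexError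
import Mathlib
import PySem

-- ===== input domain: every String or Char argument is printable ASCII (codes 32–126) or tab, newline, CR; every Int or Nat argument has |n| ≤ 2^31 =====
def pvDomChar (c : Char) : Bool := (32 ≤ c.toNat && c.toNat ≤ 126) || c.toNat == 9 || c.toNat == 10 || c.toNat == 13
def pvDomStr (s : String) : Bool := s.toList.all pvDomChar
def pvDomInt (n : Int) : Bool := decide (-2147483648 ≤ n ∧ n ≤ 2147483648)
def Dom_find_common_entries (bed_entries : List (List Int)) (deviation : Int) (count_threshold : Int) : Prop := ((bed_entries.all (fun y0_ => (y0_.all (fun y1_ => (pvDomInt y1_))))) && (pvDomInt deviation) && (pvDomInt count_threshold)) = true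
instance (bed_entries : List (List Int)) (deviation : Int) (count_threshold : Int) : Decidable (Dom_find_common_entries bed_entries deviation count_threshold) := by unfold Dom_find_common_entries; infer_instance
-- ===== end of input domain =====

-- B replaces A's scan of ALL accumulated keys per entry by a per-chromosome hash index, so only
-- same-chromosome keys are scanned; equivalence of the return value is proved on Pre_ below.

-- ===== PORT A =====
-- loop body of A's inner scan over bed_entries_dict.items()
def fceStepA (deviation : Int) (entry : List Int)
    (st : PySem.Dict (List Int) Int × List Bool) (oc : List Int × Int) :
    PySem.Dict (List Int) Int × List Bool :=
  if PySem.List.pyGetD entry 0 0 = PySem.List.pyGetD oc.1 0 0 ∧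
     |PySem.List.pyGetD entry 1 0 - PySem.List.pyGetD oc.1 1 0| ≤ deviation ∧
     |PySem.List.pyGetD entry 2 0 - PySem.List.pyGetD oc.1 2 0| ≤ deviation then
    (st.1.modify oc.1 0 (· + 1), st.2 ++ [true])      -- bed_entries_dict[other_entry] += 1 (defaultdict)
  else (st.1, st.2 ++ [false])

def find_common_entries (bed_entries : List (List Int)) (deviation : Int) (count_threshold : Int) : List (List Int) :=
  let d := bed_entries.foldl (fun (d : PySem.Dict (List Int) Int) entry =>
    if d.size = 0 then
      d.modify entry 0 (· + 1)                         -- bed_entries_dict[entry] += 1 (defaultdict)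
    else
      let st := d.items.foldl (fceStepA deviation entry) (d, ([] : List Bool))
      if !(st.2.any id) then st.1.modify entry 0 (· + 1) else st.1)
    PySem.Dict.empty
  d.items.foldl (fun acc kv => if count_threshold ≤ d.getD kv.1 0 then acc ++ [kv.1] else acc)
    ([] : List (List Int))

-- ===== PORT B =====
-- loop body of B's scan over the same-chromosome bucket; counts[key] += 1 on a plain dict is
-- insert key (getD key 0 + 1) — exact because every bucket key is present in counts.
def fceStepB (deviation : Int) (entry : List Int)
    (q : PySem.Dict (List Int) Int × Bool) (key : List Int) :
    PySem.Dict (List Int) Int × Bool :=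
  if |PySem.List.pyGetD entry 1 0 - PySem.List.pyGetD key 1 0| ≤ deviation ∧
     |PySem.List.pyGetD entry 2 0 - PySem.List.pyGetD key 2 0| ≤ deviation then
    (q.1.insert key (q.1.getD key 0 + 1), true)
  else q

def find_common_entries_alt (bed_entries : List (List Int)) (deviation : Int) (count_threshold : Int) : List (List Int) :=
  let st := bed_entries.foldl
    (fun (st : PySem.Dict (List Int) Int × PySem.Dict Int (List (List Int))) entry =>
      let c := PySem.List.pyGetD entry 0 0
      let q := (st.2.getD c []).foldl (fceStepB deviation entry) (st.1, false)
      if q.2 then (q.1, st.2)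
      else if q.1.contains entry then (q.1.insert entry (q.1.getD entry 0 + 1), st.2)
      else (q.1.insert entry 1, st.2.modify c [] (· ++ [entry])))   -- by_chrom.setdefault(c, []).append(entry)
    (PySem.Dict.empty, PySem.Dict.empty)
  st.1.keys.foldl (fun acc k => if count_threshold ≤ st.1.getD k 0 then acc ++ [k] else acc)
    ([] : List (List Int))

-- ===== PRECONDITION & SPEC =====
-- Pre_ admits well-formed inputs: every entry nonempty, and any two entries with the same first
-- field (chromosome) carry the full 3 fields chrom/start/end; outside it the Pythons raise
-- IndexError on the field comparison, except degenerate inputs whose short entry is never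
-- compared (there A returns while B, which always reads entry[0..2] when comparing, raises — see cites).
def Pre_find_common_entries (bed_entries : List (List Int)) (_deviation : Int) (_count_threshold : Int) : Prop :=
  (∀ e ∈ bed_entries, 1 ≤ e.length) ∧
  List.Pairwise (fun e1 e2 => PySem.List.pyGetD e1 0 0 = PySem.List.pyGetD e2 0 0 →
    3 ≤ e1.length ∧ 3 ≤ e2.length) bed_entries
instance (bed_entries : List (List Int)) (deviation : Int) (count_threshold : Int) : Decidable (Pre_find_common_entries bed_entries deviation count_threshold) := by unfold Pre_find_common_entries; infer_instance
def pvWitness_find_common_entries : List (List Int) × Int × Int := ([[1, 5, 9], [1, 6, 10], [2, 5, 9]], 3, 2)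

def Spec_find_common_entries (bed_entries : List (List Int)) (deviation : Int) (count_threshold : Int) (out : List (List Int)) : Prop := out = find_common_entries_alt bed_entries deviation count_threshold
instance (bed_entries : List (List Int)) (deviation : Int) (count_threshold : Int) (out : List (List Int)) : Decidable (Spec_find_common_entries bed_entries deviation count_threshold out) := by unfold Spec_find_common_entries; infer_instance

-- ===== CLAIM (what is proved, stated in full; the proofs are below) =====
def Claim_equal_find_common_entries : Prop := ∀ (bed_entries : List (List Int)) (deviation : Int) (count_threshold : Int), Dom_find_common_entries bed_entries deviation count_threshold → Pre_find_common_entries bed_entries deviation count_threshold → Spec_find_common_entries bed_entries deviation count_threshold (find_common_entries bed_entries deviation count_threshold)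

-- ===== LEMMAS AND PROOFS =====

-- A's outer-loop body, named (definitionally the lambda inside find_common_entries)
def fceA1 (deviation : Int) (d : PySem.Dict (List Int) Int) (entry : List Int) :
    PySem.Dict (List Int) Int :=
  if d.size = 0 then
    d.modify entry 0 (· + 1)
  else
    let st := d.items.foldl (fceStepA deviation entry) (d, ([] : List Bool))
    if !(st.2.any id) then st.1.modify entry 0 (· + 1) else st.1

-- B's outer-loop body, named
def fceB1 (deviation : Int)
    (st : PySem.Dict (List Int) Int × PySem.Dict Int (List (List Int))) (entry : List Int) :
    PySem.Dict (List Int) Int × PySem.Dict Int (List (List Int)) :=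
  let c := PySem.List.pyGetD entry 0 0
  let q := (st.2.getD c []).foldl (fceStepB deviation entry) (st.1, false)
  if q.2 then (q.1, st.2)
  else if q.1.contains entry then (q.1.insert entry (q.1.getD entry 0 + 1), st.2)
  else (q.1.insert entry 1, st.2.modify c [] (· ++ [entry]))

-- A's full match predicate and B's coordinate-only match, as Bools
def fceMatch (dev : Int) (e k : List Int) : Bool :=
  decide (PySem.List.pyGetD e 0 0 = PySem.List.pyGetD k 0 0 ∧
          |PySem.List.pyGetD e 1 0 - PySem.List.pyGetD k 1 0| ≤ dev ∧
          |PySem.List.pyGetD e 2 0 - PySem.List.pyGetD k 2 0| ≤ dev)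

def fceMatchB (dev : Int) (e k : List Int) : Bool :=
  decide (|PySem.List.pyGetD e 1 0 - PySem.List.pyGetD k 1 0| ≤ dev ∧
          |PySem.List.pyGetD e 2 0 - PySem.List.pyGetD k 2 0| ≤ dev)

-- increment every key of ks, in order
def fceInc (d : PySem.Dict (List Int) Int) (ks : List (List Int)) : PySem.Dict (List Int) Int :=
  ks.foldl (fun d k => d.insert k (d.getD k 0 + 1)) d

lemma fceMatch_split (dev : Int) (e k : List Int) :
    fceMatch dev e k = ((PySem.List.pyGetD k 0 0 == PySem.List.pyGetD e 0 0) && fceMatchB dev e k) := by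
  rw [Bool.eq_iff_iff]
  simp only [fceMatch, fceMatchB, Bool.and_eq_true, decide_eq_true_eq, beq_iff_eq]
  tauto

lemma fceStepA_char (dev : Int) (e : List Int) (items : List (List Int × Int))
    (d : PySem.Dict (List Int) Int) (fl : List Bool) :
    items.foldl (fceStepA dev e) (d, fl) =
      (fceInc d ((items.map Prod.fst).filter (fceMatch dev e)),
       fl ++ (items.map Prod.fst).map (fceMatch dev e)) := by
  induction items generalizing d fl with
  | nil => simp [fceInc]
  | cons kv rest ih =>
    simp only [List.foldl_cons, List.map_cons, List.filter_cons, fceStepA]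
    by_cases h : fceMatch dev e kv.1 = true
    · rw [if_pos (by simpa [fceMatch] using h)]
      simp only [h, if_pos, ih, fceInc, PySem.Dict.modify]
      simp
    · rw [if_neg (by simpa [fceMatch] using h)]
      simp only [Bool.not_eq_true] at h
      simp [ih, h, fceInc]

lemma fceStepB_char (dev : Int) (e : List Int) (ks : List (List Int))
    (d : PySem.Dict (List Int) Int) (b : Bool) :
    ks.foldl (fceStepB dev e) (d, b) =
      (fceInc d (ks.filter (fceMatchB dev e)), b || ks.any (fceMatchB dev e)) := by
  induction ks generalizing d b with
  | nil => simp [fceInc]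
  | cons k rest ih =>
    simp only [List.foldl_cons, List.filter_cons, List.any_cons, fceStepB]
    by_cases h : fceMatchB dev e k = true
    · rw [if_pos (by simpa [fceMatchB] using h)]
      simp [ih, h, fceInc]
    · rw [if_neg (by simpa [fceMatchB] using h)]
      simp only [Bool.not_eq_true] at h
      simp [ih, h, fceInc]

lemma keys_fceInc (d : PySem.Dict (List Int) Int) (ks : List (List Int))
    (h : ∀ k ∈ ks, k ∈ d.keys) : (fceInc d ks).keys = d.keys := by
  induction ks generalizing d with
  | nil => rfl
  | cons k rest ih =>
    simp only [fceInc, List.foldl_cons]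
    have hk : d.contains k = true := (PySem.Dict.contains_iff_mem_keys d k).mpr (h k (by simp))
    have hkeys : (d.insert k (d.getD k 0 + 1)).keys = d.keys :=
      PySem.Dict.keys_insert_of_contains _ _ hk
    rw [show (rest.foldl (fun d k => d.insert k (d.getD k 0 + 1)) (d.insert k (d.getD k 0 + 1))) = fceInc (d.insert k (d.getD k 0 + 1)) rest from rfl, ih _ ?_, hkeys]
    intro x hx
    rw [hkeys]
    exact h x (by simp [hx])

-- the per-chromosome index invariant
def fceInv (d : PySem.Dict (List Int) Int) (byc : PySem.Dict Int (List (List Int))) : Prop :=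
  ∀ c, byc.getD c [] = d.keys.filter (fun k => PySem.List.pyGetD k 0 0 == c)

-- canonical form of A's outer-loop body
lemma fceA1_canon (dev : Int) (e : List Int) (d : PySem.Dict (List Int) Int) :
    fceA1 dev d e =
    (if d.keys.any (fceMatch dev e) then fceInc d (d.keys.filter (fceMatch dev e))
     else d.insert e (d.getD e 0 + 1)) := by
  unfold fceA1
  by_cases hs : d.size = 0
  · have hitems : d.items = [] := List.eq_nil_of_length_eq_zero hs
    have hkeys : d.keys = [] := by simp [PySem.Dict.keys, hitems]
    rw [if_pos hs, hkeys]
    simp [PySem.Dict.modify]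
  · rw [if_neg hs]
    simp only [fceStepA_char dev e d.items d ([] : List Bool)]
    have hkeys : d.items.map Prod.fst = d.keys := rfl
    rw [hkeys]
    by_cases ha : d.keys.any (fceMatch dev e) = true
    · have : (([] : List Bool) ++ d.keys.map (fceMatch dev e)).any id = true := by
        simpa [List.any_map] using ha
      simp only [this, Bool.not_true, Bool.false_eq_true, if_false, if_pos ha]
    · have hall : ∀ k ∈ d.keys, ¬ (fceMatch dev e k = true) := by
        simpa [List.any_eq_true] using ha
      have hfl : (([] : List Bool) ++ d.keys.map (fceMatch dev e)).any id = false := by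
        simp only [Bool.not_eq_true] at hall ⊢
        simp [List.any_map, List.any_eq_false]
        intro k hk; exact hall k hk
      have hfilter : d.keys.filter (fceMatch dev e) = [] := by
        rw [List.filter_eq_nil_iff]; exact hall
      rw [hfilter, if_neg ha]
      simp only [hfl, Bool.not_false, if_true]
      rfl

-- B's body computes the same counts dict and preserves the invariant
lemma fceB1_counts (dev : Int) (e : List Int) (d : PySem.Dict (List Int) Int)
    (byc : PySem.Dict Int (List (List Int))) (hinv : fceInv d byc) :
    (fceB1 dev (d, byc) e).1 = fceA1 dev d e := by
  have hb := hinv (PySem.List.pyGetD e 0 0)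
  have hfilter : ((d.keys.filter (fun k => PySem.List.pyGetD k 0 0 == PySem.List.pyGetD e 0 0)).filter (fceMatchB dev e)) = d.keys.filter (fceMatch dev e) := by
    rw [List.filter_filter]
    apply List.filter_congr
    intro k _
    rw [fceMatch_split]
    exact (Bool.and_comm _ _).symm
  have hany : ((d.keys.filter (fun k => PySem.List.pyGetD k 0 0 == PySem.List.pyGetD e 0 0)).any (fceMatchB dev e)) = d.keys.any (fceMatch dev e) := by
    rw [List.any_filter]
    simp only [← fceMatch_split]
  simp only [fceB1, hb, fceStepB_char, Bool.false_or, hfilter, hany]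
  rw [fceA1_canon]
  by_cases ha : d.keys.any (fceMatch dev e) = true
  · simp only [ha, if_true]
  · simp only [Bool.not_eq_true] at ha
    have hfe : d.keys.filter (fceMatch dev e) = [] := by
      rw [List.filter_eq_nil_iff]
      intro k hk
      simp only [List.any_eq_false] at ha
      simpa using ha k hk
    simp only [ha, hfe, Bool.false_eq_true, if_false, fceInc, List.foldl_nil]
    by_cases hco : d.contains e = true
    · simp only [hco, if_true]
    · simp only [Bool.not_eq_true] at hco
      simp only [hco, Bool.false_eq_true, if_false,
        PySem.Dict.getD_of_not_contains d 0 hco]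
      norm_num

lemma fceB1_inv (dev : Int) (e : List Int) (d : PySem.Dict (List Int) Int)
    (byc : PySem.Dict Int (List (List Int))) (hinv : fceInv d byc) :
    fceInv (fceA1 dev d e) (fceB1 dev (d, byc) e).2 := by
  have hb := hinv (PySem.List.pyGetD e 0 0)
  have hfilter : ((d.keys.filter (fun k => PySem.List.pyGetD k 0 0 == PySem.List.pyGetD e 0 0)).filter (fceMatchB dev e)) = d.keys.filter (fceMatch dev e) := by
    rw [List.filter_filter]
    apply List.filter_congr
    intro k _
    rw [fceMatch_split]
    exact (Bool.and_comm _ _).symm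
  have hany : ((d.keys.filter (fun k => PySem.List.pyGetD k 0 0 == PySem.List.pyGetD e 0 0)).any (fceMatchB dev e)) = d.keys.any (fceMatch dev e) := by
    rw [List.any_filter]
    simp only [← fceMatch_split]
  simp only [fceB1, hb, fceStepB_char, Bool.false_or, hfilter, hany]
  rw [fceA1_canon]
  by_cases ha : d.keys.any (fceMatch dev e) = true
  · simp only [ha, if_true]
    intro c
    rw [hinv c, keys_fceInc]
    intro k hk
    exact List.mem_of_mem_filter hk
  · simp only [Bool.not_eq_true] at ha
    have hfe : d.keys.filter (fceMatch dev e) = [] := by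
      rw [List.filter_eq_nil_iff]
      intro k hk
      simp only [List.any_eq_false] at ha
      simpa using ha k hk
    simp only [ha, hfe, Bool.false_eq_true, if_false, fceInc, List.foldl_nil]
    by_cases hco : d.contains e = true
    · simp only [hco, if_true]
      intro c
      rw [hinv c, PySem.Dict.keys_insert_of_contains _ _ hco]
    · simp only [Bool.not_eq_true] at hco
      simp only [hco, Bool.false_eq_true, if_false]
      intro c
      rw [PySem.Dict.keys_insert_of_not_contains _ _ hco, List.filter_append,
        PySem.Dict.getD_modify]
      by_cases hc : c = PySem.List.pyGetD e 0 0
      · rw [if_pos hc]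
        subst hc
        rw [hb]
        simp [List.filter]
      · rw [if_neg hc, hinv c]
        have hne : (PySem.List.pyGetD e 0 0 == c) = false :=
          beq_eq_false_iff_ne.mpr (fun h => hc h.symm)
        simp [List.filter, hne]

lemma fce_outer (dev : Int) (es : List (List Int)) (d : PySem.Dict (List Int) Int)
    (byc : PySem.Dict Int (List (List Int))) (hinv : fceInv d byc) :
    (es.foldl (fceB1 dev) (d, byc)).1 = es.foldl (fceA1 dev) d ∧
    fceInv (es.foldl (fceA1 dev) d) (es.foldl (fceB1 dev) (d, byc)).2 := by
  induction es generalizing d byc with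
  | nil => exact ⟨rfl, hinv⟩
  | cons e rest ih =>
    simp only [List.foldl_cons]
    have hc := fceB1_counts dev e d byc hinv
    have hi := fceB1_inv dev e d byc hinv
    have : fceB1 dev (d, byc) e = ((fceB1 dev (d, byc) e).1, (fceB1 dev (d, byc) e).2) := rfl
    rw [this, hc]
    exact ih _ _ hi

-- ===== VERDICT (by name: the statement is the Claim_ definition above) =====
theorem find_common_entries_spec : Claim_equal_find_common_entries := by
  intro bed_entries deviation count_threshold _ _
  unfold Spec_find_common_entries
  show (let d := bed_entries.foldl (fceA1 deviation) PySem.Dict.empty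
        d.items.foldl (fun acc kv => if count_threshold ≤ d.getD kv.1 0 then acc ++ [kv.1] else acc) ([] : List (List Int))) =
       (let st := bed_entries.foldl (fceB1 deviation) (PySem.Dict.empty, PySem.Dict.empty)
        st.1.keys.foldl (fun acc k => if count_threshold ≤ st.1.getD k 0 then acc ++ [k] else acc) ([] : List (List Int)))
  have hinv0 : fceInv PySem.Dict.empty PySem.Dict.empty := by
    intro c; simp [PySem.Dict.getD_empty, PySem.Dict.keys_empty]
  obtain ⟨h1, -⟩ := fce_outer deviation bed_entries PySem.Dict.empty PySem.Dict.empty hinv0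
  simp only
  rw [h1, PySem.Dict.keys, List.foldl_map]
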